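-- pv_equiv track=rewrite | github.com/llyxanda/BTH-Python | analyzer_grund.py | zip_2_lists
-- ===== SOURCE A (Python) =====
-- def zip_2_lists(fill_value, list1, list2):
--     '''
--     Function to catch all the wrong entered words in the file text vs.
--     user input and store it as tuples of form ([file word], [input word])
--     '''
--     zipped_list = []
--     for idx in range(max(len(list1), len(list2))):
--         try:
--             if list1[idx] != list2[idx]:
--                 zipped_list.append((list1[idx], list2[idx]))
--         except:
--             if len(list1) > len(list2):
--                 zipped_list.append((list1[idx], fill_value))
--             else:
--                 zipped_list.append((fill_value, list2[idx]))
--     return zipped_list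
-- ===== SOURCE B (Python) =====
-- def zip_2_lists(fill_value, list1, list2):
--     """Slice-based re-implementation: filtered zip of the overlap, then the
--     unconditional padded tail of the longer list."""
--     m = min(len(list1), len(list2))
--     result = [(a, b) for a, b in zip(list1[:m], list2[:m]) if a != b]
--     if len(list1) > len(list2):
--         result += [(x, fill_value) for x in list1[m:]]
--     else:
--         result += [(fill_value, x) for x in list2[m:]]
--     return result
-- ===== Notes on version B (the rewrite author's own statement) =====
-- stated objective: simpler
-- what changed: Replaces the indexed try/except loop over range(max(len1,len2)) with two slice-based passes: a filtered zip over the common prefix plus an unconditionally padded tail of the longer list.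
import Mathlib
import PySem

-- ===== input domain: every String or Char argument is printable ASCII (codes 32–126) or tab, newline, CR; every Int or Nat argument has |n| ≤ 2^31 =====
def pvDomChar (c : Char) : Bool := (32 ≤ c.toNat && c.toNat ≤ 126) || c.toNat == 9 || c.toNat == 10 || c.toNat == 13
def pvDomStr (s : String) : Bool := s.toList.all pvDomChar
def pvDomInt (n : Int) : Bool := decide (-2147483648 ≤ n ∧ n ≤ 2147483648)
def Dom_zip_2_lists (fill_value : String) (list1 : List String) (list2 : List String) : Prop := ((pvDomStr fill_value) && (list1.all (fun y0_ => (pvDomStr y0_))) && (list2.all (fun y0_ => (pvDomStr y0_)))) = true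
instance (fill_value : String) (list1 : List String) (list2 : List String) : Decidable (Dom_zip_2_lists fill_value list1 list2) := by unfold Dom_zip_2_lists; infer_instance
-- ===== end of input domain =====

-- B replaces A's indexed try/except loop by two slice-based passes (filtered zip + padded tail); objective: simpler.

-- ===== PORT A =====
-- literal transliteration of A's indexed loop; the `match` plays the try/except:
-- both indexings succeed → the `if`-branch, otherwise (IndexError) the except-branch,
-- in which the indexing of the longer list is in range (guarded with .getD).
def zip_2_lists (fill_value : String) (list1 : List String) (list2 : List String) : List (String × String) :=
  (PySem.List.pyRange 0 (max list1.length list2.length : Int) 1).foldl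
    (fun zipped_list idx =>
      match PySem.List.pyGet? list1 idx, PySem.List.pyGet? list2 idx with
      | some a, some b => if a ≠ b then zipped_list ++ [(a, b)] else zipped_list
      | _, _ =>
        if list2.length < list1.length then
          zipped_list ++ [((PySem.List.pyGet? list1 idx).getD "", fill_value)]
        else
          zipped_list ++ [(fill_value, (PySem.List.pyGet? list2 idx).getD "")]) []

-- ===== PORT B =====
def zip_2_lists_alt (fill_value : String) (list1 : List String) (list2 : List String) : List (String × String) :=
  let m := min list1.length list2.length
  (((list1.take m).zip (list2.take m)).filter (fun p => p.1 ≠ p.2)) ++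
    (if list2.length < list1.length then (list1.drop m).map (fun x => (x, fill_value))
     else (list2.drop m).map (fun x => (fill_value, x)))

-- ===== PRECONDITION & SPEC =====
def Spec_zip_2_lists (fill_value : String) (list1 : List String) (list2 : List String) (out : List (String × String)) : Prop := out = zip_2_lists_alt fill_value list1 list2
instance (fill_value : String) (list1 : List String) (list2 : List String) (out : List (String × String)) : Decidable (Spec_zip_2_lists fill_value list1 list2 out) := by unfold Spec_zip_2_lists; infer_instance

-- ===== CLAIM (what is proved, stated in full; the proofs are below) =====
def Claim_equal_zip_2_lists : Prop := ∀ (fill_value : String) (list1 : List String) (list2 : List String), Dom_zip_2_lists fill_value list1 list2 → Spec_zip_2_lists fill_value list1 list2 (zip_2_lists fill_value list1 list2)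

-- ===== LEMMAS AND PROOFS =====

-- per-index contribution of A's loop body, over Nat indices
def pvG (fill_value : String) (list1 list2 : List String) (k : Nat) : List (String × String) :=
  match list1[k]?, list2[k]? with
  | some a, some b => if a ≠ b then [(a, b)] else []
  | _, _ =>
    if list2.length < list1.length then [(list1[k]?.getD "", fill_value)]
    else [(fill_value, list2[k]?.getD "")]

lemma pvG_succ (fill_value : String) (x y : String) (xs ys : List String) (k : Nat) :
    pvG fill_value (x :: xs) (y :: ys) (k + 1) = pvG fill_value xs ys k := by
  simp [pvG]

lemma map_range_getD {α β : Type} (l : List α) (F : α → β) (d : α) :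
    (List.range l.length).map (fun k => F (l[k]?.getD d)) = l.map F := by
  apply List.ext_getElem
  · simp
  · intro i h1 h2
    have hi : i < l.length := by simpa using h2
    simp [List.getElem?_eq_getElem hi]

lemma flatMap_singleton_range {β : Type} (n : Nat) (f : Nat → β) :
    (List.range n).flatMap (fun k => [f k]) = (List.range n).map f := by
  induction n with
  | zero => simp
  | succ n ih => simp [List.range_succ, ih]

lemma foldl_body_flatMap (fill_value : String) (list1 list2 : List String) (n : Nat) :
    (List.range n).foldl
      (fun acc k =>
        match list1[k]?, list2[k]? with
        | some a, some b => if a ≠ b then acc ++ [(a, b)] else acc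
        | _, _ =>
          if list2.length < list1.length then acc ++ [(list1[k]?.getD "", fill_value)]
          else acc ++ [(fill_value, list2[k]?.getD "")]) []
    = (List.range n).flatMap (pvG fill_value list1 list2) := by
  have hfun : (fun (acc : List (String × String)) (k : Nat) =>
        match list1[k]?, list2[k]? with
        | some a, some b => if a ≠ b then acc ++ [(a, b)] else acc
        | _, _ =>
          if list2.length < list1.length then acc ++ [(list1[k]?.getD "", fill_value)]
          else acc ++ [(fill_value, list2[k]?.getD "")])
      = fun acc k => acc ++ pvG fill_value list1 list2 k := by
    funext acc k
    simp only [pvG]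
    rcases list1[k]? with _ | a <;> rcases list2[k]? with _ | b <;>
      simp <;> split_ifs <;> simp
  rw [hfun]
  have := PySem.List.foldl_append_eq_flatMap (pvG fill_value list1 list2)
    (List.range n) ([] : List (String × String))
  simpa using this

lemma zip_A_flatMap (fill_value : String) (list1 list2 : List String) :
    zip_2_lists fill_value list1 list2 =
      (List.range (max list1.length list2.length)).flatMap (pvG fill_value list1 list2) := by
  unfold zip_2_lists
  rw [PySem.List.pyRange_one]
  have hcast : ((max (list1.length : Int) (list2.length : Int)) - 0).toNat
      = max list1.length list2.length := by
    omega
  rw [hcast, List.foldl_map]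
  simp only [zero_add, PySem.List.pyGet?_natCast]
  exact foldl_body_flatMap fill_value list1 list2 _

lemma flatMap_G_eq_alt (fill_value : String) (list1 list2 : List String) :
    (List.range (max list1.length list2.length)).flatMap (pvG fill_value list1 list2) =
      zip_2_lists_alt fill_value list1 list2 := by
  induction list1 generalizing list2 with
  | nil =>
    have h1 : pvG fill_value [] list2 = fun k => [(fill_value, list2[k]?.getD "")] := by
      funext k; simp [pvG]
    simp only [List.length_nil, Nat.zero_max, h1, flatMap_singleton_range]
    simp [map_range_getD list2 (fun x => (fill_value, x)) "", zip_2_lists_alt]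
  | cons x xs ih =>
    cases list2 with
    | nil =>
      have h1 : pvG fill_value (x :: xs) [] = fun k => [((x :: xs)[k]?.getD "", fill_value)] := by
        funext k; simp [pvG]
      simp only [List.length_nil, Nat.max_zero, h1, flatMap_singleton_range]
      have h2 := map_range_getD (x :: xs) (fun y => (y, fill_value)) ""
      simp only [List.length_cons] at h2
      simp [h2, zip_2_lists_alt]
    | cons y ys =>
      have hmax : max (x :: xs).length (y :: ys).length = max xs.length ys.length + 1 := by
        simp [Nat.succ_max_succ]
      rw [hmax, List.range_succ_eq_map, List.flatMap_cons, List.flatMap_map]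
      have hshift : (fun k => pvG fill_value (x :: xs) (y :: ys) (k + 1))
          = pvG fill_value xs ys := by
        funext k; exact pvG_succ fill_value x y xs ys k
      simp only [Nat.succ_eq_add_one, hshift, ih ys]
      have h0 : pvG fill_value (x :: xs) (y :: ys) 0 = if x ≠ y then [(x, y)] else [] := by
        simp [pvG]
      rw [h0]
      simp only [zip_2_lists_alt, List.length_cons, Nat.succ_min_succ,
        List.take_succ_cons, List.zip_cons_cons, List.filter_cons, List.drop_succ_cons,
        Nat.succ_lt_succ_iff]
      split_ifs <;> simp_all

-- ===== VERDICT (by name: the statement is the Claim_ definition above) =====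
theorem zip_2_lists_spec : Claim_equal_zip_2_lists := by
  intro fill_value list1 list2 _
  unfold Spec_zip_2_lists
  rw [zip_A_flatMap, flatMap_G_eq_alt]
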